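-- pv_equiv track=rewrite | github.com/Orville-Yan/MA-GA | NEW-CODE1/RPN/RPNbuilder.py | argnorm
-- ===== SOURCE A (Python) =====
-- def argnorm(seed_str):
--     map = {
--         'ARG0': 'D_O',
--         'ARG1': 'D_C',
--         'ARG2': 'D_H',
--         'ARG3': 'D_L',
--         'ARG4': 'D_V',
--         'ARG5': 'M_O',
--         'ARG6': 'M_C',
--         'ARG7': 'M_H',
--         'ARG8': 'M_L',
--         'ARG9': 'M_V'
--     }
--     for key, value in map.items():
--         seed_str = seed_str.replace(value, key)
--     return seed_str
-- ===== SOURCE B (Python) =====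
-- def argnorm(seed_str):
--     rev = {
--         'D_O': 'ARG0',
--         'D_C': 'ARG1',
--         'D_H': 'ARG2',
--         'D_L': 'ARG3',
--         'D_V': 'ARG4',
--         'M_O': 'ARG5',
--         'M_C': 'ARG6',
--         'M_H': 'ARG7',
--         'M_L': 'ARG8',
--         'M_V': 'ARG9',
--     }
--     out = []
--     i = 0
--     n = len(seed_str)
--     while i < n:
--         tok = seed_str[i:i + 3]
--         if tok in rev:
--             out.append(rev[tok])
--             i += 3
--         else:
--             out.append(seed_str[i])
--             i += 1
--     return ''.join(out)
-- ===== Notes on version B (the rewrite author's own statement) =====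
-- stated objective: alternative
-- what changed: Replaced ten sequential full-string replace() passes by one left-to-right scan that looks each 3-char window up in a reversed token map and emits the ARG token (or the char) as it goes; valid because the ten tokens cannot overlap each other and the inserted ARG text can never create a new token.
import Mathlib
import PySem

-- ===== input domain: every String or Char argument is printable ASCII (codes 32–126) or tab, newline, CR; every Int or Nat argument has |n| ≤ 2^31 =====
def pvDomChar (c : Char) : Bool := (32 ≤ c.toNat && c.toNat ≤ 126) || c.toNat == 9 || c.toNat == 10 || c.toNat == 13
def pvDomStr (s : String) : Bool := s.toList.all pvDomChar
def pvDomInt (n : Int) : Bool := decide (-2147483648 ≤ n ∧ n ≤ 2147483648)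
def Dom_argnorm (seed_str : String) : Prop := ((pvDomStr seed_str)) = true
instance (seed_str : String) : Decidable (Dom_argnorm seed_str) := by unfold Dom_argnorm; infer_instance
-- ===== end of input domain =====

-- B replaces A's ten sequential full-string replace() passes by one left-to-right scan with a
-- reversed token map (alternative decomposition; same result since tokens cannot overlap and the
-- inserted ARG text cannot create new tokens).

-- ===== PORT A =====
-- ten sequential passes: for key, value in map.items(): seed_str = seed_str.replace(value, key)
def argnorm (seed_str : String) : String :=
  List.foldl (fun acc (kv : String × String) => PySem.Str.replace acc kv.2 kv.1) seed_str
    [("ARG0", "D_O"), ("ARG1", "D_C"), ("ARG2", "D_H"), ("ARG3", "D_L"), ("ARG4", "D_V"),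
     ("ARG5", "M_O"), ("ARG6", "M_C"), ("ARG7", "M_H"), ("ARG8", "M_L"), ("ARG9", "M_V")]

-- ===== PORT B =====
-- the reversed map rev = {'D_O': 'ARG0', …} (dict → association list, strings as char lists)
def revTab : List (List Char × List Char) :=
  [(['D', '_', 'O'], ['A', 'R', 'G', '0']),
   (['D', '_', 'C'], ['A', 'R', 'G', '1']),
   (['D', '_', 'H'], ['A', 'R', 'G', '2']),
   (['D', '_', 'L'], ['A', 'R', 'G', '3']),
   (['D', '_', 'V'], ['A', 'R', 'G', '4']),
   (['M', '_', 'O'], ['A', 'R', 'G', '5']),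
   (['M', '_', 'C'], ['A', 'R', 'G', '6']),
   (['M', '_', 'H'], ['A', 'R', 'G', '7']),
   (['M', '_', 'L'], ['A', 'R', 'G', '8']),
   (['M', '_', 'V'], ['A', 'R', 'G', '9'])]

-- the while loop of Source B: look the 3-char window up; on a hit emit the ARG token and jump 3,
-- otherwise emit the character and advance 1
def scanT (tab : List (List Char × List Char)) : List Char → List Char
  | [] => []
  | c :: t =>
    match List.lookup ((c :: t).take 3) tab with
    | some a => a ++ scanT tab (t.drop 2)
    | none => c :: scanT tab t
termination_by l => l.length
decreasing_by
  all_goals (simp [List.length_drop]; try omega)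

def argnorm_alt (seed_str : String) : String := String.ofList (scanT revTab seed_str.toList)

-- ===== PRECONDITION & SPEC =====
def Spec_argnorm (seed_str : String) (out : String) : Prop := out = argnorm_alt seed_str
instance (seed_str : String) (out : String) : Decidable (Spec_argnorm seed_str out) := by unfold Spec_argnorm; infer_instance

-- ===== CLAIM (what is proved, stated in full; the proofs are below) =====
def Claim_equal_argnorm : Prop := ∀ (seed_str : String), Dom_argnorm seed_str → Spec_argnorm seed_str (argnorm seed_str)

-- ===== LEMMAS AND PROOFS =====
def myRep (k0 : Char) (ks v : List Char) : List Char → List Char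
  | [] => []
  | c :: t => if (k0 :: ks).isPrefixOf (c :: t) then v ++ myRep k0 ks v (t.drop ks.length) else c :: myRep k0 ks v t
termination_by l => l.length
decreasing_by
  all_goals (simp [List.length_drop]; try omega)

theorem go_eq (k0 : Char) (ks v : List Char) : ∀ (fuel : Nat) (l acc : List Char), l.length ≤ fuel →
    PySem.Chars.replace.go (k0 :: ks) v fuel l acc = acc.reverse ++ myRep k0 ks v l := by
  intro fuel
  induction fuel with
  | zero =>
    intro l acc h
    match l with
    | [] => simp [PySem.Chars.replace.go, myRep]
    | c :: t => simp at h
  | succ n ih =>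
    intro l acc h
    match l with
    | [] => simp [PySem.Chars.replace.go, myRep]
    | c :: t =>
      rw [PySem.Chars.replace.go, myRep]
      by_cases hp : (k0 :: ks).isPrefixOf (c :: t)
      · simp only [hp, if_true]
        rw [ih]
        · simp
        · simp at h ⊢; omega
      · simp only [hp, if_false, Bool.false_eq_true]
        rw [ih]
        · simp
        · simp at h ⊢; omega

theorem lookup_mem {tab : List (List Char × List Char)} {x : List Char} {a : List Char}
    (h : List.lookup x tab = some a) : (x, a) ∈ tab := by
  induction tab with
  | nil => simp [List.lookup] at h
  | cons p rest ih =>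
    rw [List.lookup] at h
    by_cases he : x = p.1
    · simp [he] at h
      subst he
      rcases p with ⟨k, b⟩
      simp at h ⊢
      left; exact h.symm
    · simp [beq_eq_false_iff_ne.mpr he] at h
      exact List.mem_cons_of_mem _ (ih h)

theorem lookup_ne_none_of_mem {tab : List (List Char × List Char)} {x a : List Char}
    (h : (x, a) ∈ tab) : List.lookup x tab ≠ none := by
  induction tab with
  | nil => simp at h
  | cons p rest ih =>
    rw [List.lookup]
    rcases List.mem_cons.mp h with h1 | h2
    · subst h1; simp
    · by_cases he : x = p.1
      · simp [he]
      · simp only [beq_eq_false_iff_ne.mpr he]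
        exact ih h2

theorem prefix_append_cases {b aa w : List Char} (h : b <+: aa ++ w) : b <+: aa ∨ aa <+: b :=
  List.prefix_or_prefix_of_prefix h (List.prefix_append aa w)

-- no key of tab is a prefix of X ⇒ lookup of X.take 3 fails
theorem lookup_take3_none {tab : List (List Char × List Char)} {X : List Char}
    (htab : ∀ p ∈ tab, p.1.length = 3)
    (h : ∀ p ∈ tab, ¬ (p.1 <+: X)) : List.lookup (X.take 3) tab = none := by
  induction tab with
  | nil => simp [List.lookup]
  | cons p rest ih =>
    rw [List.lookup]
    by_cases he : X.take 3 = p.1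
    · exfalso
      exact h p (List.mem_cons_self) (he ▸ List.take_prefix 3 X)
    · simp only [beq_eq_false_iff_ne.mpr (fun hx => he hx)]
      exact ih (fun q hq => htab q (List.mem_cons_of_mem _ hq)) (fun q hq => h q (List.mem_cons_of_mem _ hq))


-- scanning passes over any suffix of v without firing, given C1
theorem pass {tab : List (List Char × List Char)} {v : List Char}
    (htab : ∀ p ∈ tab, p.1.length = 3)
    (hC1 : ∀ p ∈ tab, ∀ j, j < v.length → ¬ (p.1 <+: v.drop j) ∧ ¬ (v.drop j <+: p.1)) :
    ∀ v' w, v' <:+ v → scanT tab (v' ++ w) = v' ++ scanT tab w := by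
  intro v'
  induction v' with
  | nil => intro w _; simp
  | cons c u ih =>
    intro w hsuf
    have hlen : (c :: u).length ≤ v.length := List.IsSuffix.length_le hsuf
    have hj : v.drop (v.length - (c :: u).length) = c :: u := (List.suffix_iff_eq_drop.mp hsuf).symm
    have hjlt : v.length - (c :: u).length < v.length := by simp at hlen ⊢; omega
    have hnone : List.lookup ((c :: (u ++ w)).take 3) tab = none := by
      apply lookup_take3_none htab
      intro p hp hpre
      rcases prefix_append_cases (by simpa using hpre : p.1 <+: (c :: u) ++ w) with h1 | h2
      · exact (hC1 p hp _ hjlt).1 (by rw [hj]; exact h1)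
      · exact (hC1 p hp _ hjlt).2 (by rw [hj]; exact h2)
    have : (c :: u) ++ w = c :: (u ++ w) := rfl
    rw [this, scanT, hnone, ih w (List.IsSuffix.trans (List.suffix_cons c u) hsuf)]
    rfl

theorem myRep_pos {k0 : Char} {ks v : List Char} {c : Char} {t : List Char}
    (h : (k0 :: ks) <+: (c :: t)) :
    myRep k0 ks v (c :: t) = v ++ myRep k0 ks v (t.drop ks.length) := by
  rw [myRep, if_pos (List.isPrefixOf_iff_prefix.mpr h)]

theorem myRep_neg {k0 : Char} {ks v : List Char} {c : Char} {t : List Char}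
    (h : ¬ (k0 :: ks) <+: (c :: t)) :
    myRep k0 ks v (c :: t) = c :: myRep k0 ks v t := by
  rw [myRep, if_neg (fun hb => h (List.isPrefixOf_iff_prefix.mp hb))]

-- shape of the first two characters of myRep output
theorem myRep_take2 {k0 : Char} {ks v : List Char} (hv : 2 ≤ v.length) :
    ∀ t x y r', myRep k0 ks v t = x :: y :: r' →
      (v.take 2 = [x, y]) ∨ (v.take 1 = [y] ∧ t.head? = some x) ∨ (t.take 2 = [x, y]) := by
  intro t x y r' hM
  match t with
  | [] => rw [myRep] at hM; exact absurd hM (by simp)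
  | c :: t₂ =>
    by_cases h1 : (k0 :: ks) <+: (c :: t₂)
    · rw [myRep_pos h1] at hM
      left
      match v, hv with
      | v0 :: v1 :: vr, _ => simp at hM ⊢; exact ⟨hM.1, hM.2.1⟩
    · rw [myRep_neg h1] at hM
      obtain ⟨hx, hM2⟩ : c = x ∧ myRep k0 ks v t₂ = y :: r' := by
        constructor <;> [exact (List.cons.injEq _ _ _ _ ▸ hM).1; exact (List.cons.injEq _ _ _ _ ▸ hM).2]
      match t₂ with
      | [] => rw [myRep] at hM2; exact absurd hM2 (by simp)
      | d :: t₃ =>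
        by_cases h2 : (k0 :: ks) <+: (d :: t₃)
        · rw [myRep_pos h2] at hM2
          right; left
          match v, hv with
          | v0 :: vr, _ =>
            refine ⟨?_, by simp [hx]⟩
            simp at hM2 ⊢
            exact hM2.1
        · rw [myRep_neg h2] at hM2
          right; right
          have : d = y := (List.cons.injEq _ _ _ _ ▸ hM2).1
          simp [hx, this]

theorem scanT_some {tab : List (List Char × List Char)} {c : Char} {t a : List Char}
    (h : List.lookup ((c :: t).take 3) tab = some a) :
    scanT tab (c :: t) = a ++ scanT tab (t.drop 2) := by
  rw [scanT, h]

theorem scanT_none {tab : List (List Char × List Char)} {c : Char} {t : List Char}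
    (h : List.lookup ((c :: t).take 3) tab = none) :
    scanT tab (c :: t) = c :: scanT tab t := by
  rw [scanT, h]

theorem step (k0 : Char) (ks v : List Char) (tab : List (List Char × List Char))
    (hk : ks.length = 2) (hv : 2 ≤ v.length)
    (htab : ∀ p ∈ tab, p.1.length = 3)
    (hC1 : ∀ p ∈ tab, ∀ j, j < v.length → ¬ (p.1 <+: v.drop j) ∧ ¬ (v.drop j <+: p.1))
    (hC2 : ∀ p ∈ tab, ¬ (p.1.drop 1 <+: (k0 :: ks)) ∧ ¬ (p.1.drop 2 <+: (k0 :: ks)))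
    (hC3 : ∀ p ∈ tab, ¬ (p.1.drop 1 <+: v) ∧ ¬ (p.1.drop 2 <+: v)) :
    ∀ n l, l.length ≤ n → scanT ((k0 :: ks, v) :: tab) l = scanT tab (myRep k0 ks v l) := by
  have hklen : (k0 :: ks).length = 3 := by simp [hk]
  intro n
  induction n with
  | zero =>
    intro l h
    have : l = [] := List.eq_nil_of_length_eq_zero (Nat.le_zero.mp h)
    subst this
    rw [myRep, scanT, scanT]
  | succ n ih =>
    intro l hlen
    match l with
    | [] => rw [myRep, scanT, scanT]
    | c :: t =>
      have htlen : t.length ≤ n := by simpa using hlen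
      by_cases heq : (c :: t).take 3 = k0 :: ks
      · -- the head token fires
        have hcase : List.lookup ((c :: t).take 3) ((k0 :: ks, v) :: tab) = some v := by
          rw [List.lookup, heq]; simp
        have hpre : (k0 :: ks) <+: (c :: t) := heq ▸ List.take_prefix 3 (c :: t)
        have hdl : (t.drop 2).length ≤ n := by rw [List.length_drop]; omega
        rw [scanT_some hcase, myRep_pos hpre, hk,
          pass htab hC1 v (myRep k0 ks v (t.drop 2)) (List.suffix_refl v),
          ih (t.drop 2) hdl]
      · rcases hcase : List.lookup ((c :: t).take 3) ((k0 :: ks, v) :: tab) with _ | v₀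
        · -- no token fires at the front
          have hktn : ¬ (k0 :: ks) <+: (c :: t) := by
            intro hpre
            exact heq (by rw [(List.prefix_iff_eq_take.mp hpre : _), hklen])
          have htabnone : List.lookup ((c :: t).take 3) tab = none := by
            rw [List.lookup, beq_eq_false_iff_ne.mpr heq] at hcase
            exact hcase
          rw [scanT_none hcase, myRep_neg hktn]
          have hnone2 : List.lookup ((c :: myRep k0 ks v t).take 3) tab = none := by
            rcases hM : myRep k0 ks v t with _ | ⟨x, M2⟩
            · rcases hcase2 : List.lookup ((c :: ([] : List Char)).take 3) tab with _ | a
              · rfl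
              · have hmem := lookup_mem hcase2
                simp at hmem
                exact absurd (htab _ hmem) (by simp)
            · rcases M2 with _ | ⟨y, r'⟩
              · rcases hcase2 : List.lookup ((c :: [x]).take 3) tab with _ | a
                · rfl
                · have hmem := lookup_mem hcase2
                  simp at hmem
                  exact absurd (htab _ hmem) (by simp)
              · rcases hcase2 : List.lookup ((c :: x :: y :: r').take 3) tab with _ | a
                · rfl
                · exfalso
                  have hmem := lookup_mem hcase2
                  have h3 : (c :: x :: y :: r').take 3 = [c, x, y] := by simp
                  rw [h3] at hmem
                  rcases myRep_take2 hv t x y r' hM with h1 | ⟨h2, _⟩ | h3t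
                  · exact (hC3 _ hmem).1 (by simpa [← h1] using List.take_prefix 2 v)
                  · exact (hC3 _ hmem).2 (by simpa [← h2] using List.take_prefix 1 v)
                  · have hx3 : (c :: t).take 3 = [c, x, y] := by
                      simp [h3t]
                    rw [hx3] at htabnone
                    exact lookup_ne_none_of_mem hmem htabnone
          rw [scanT_none hnone2, ih t htlen]
        · -- a token of tab fires at the front
          have htabsome : List.lookup ((c :: t).take 3) tab = some v₀ := by
            rw [List.lookup, beq_eq_false_iff_ne.mpr heq] at hcase
            exact hcase
          have hmem := lookup_mem htabsome
          have hk'len : ((c :: t).take 3).length = 3 := htab _ hmem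
          have hl3 : 3 ≤ (c :: t).length := by
            rw [List.length_take] at hk'len; omega
          match t, htlen, hmem, htabsome, hcase, heq, hl3 with
          | b :: c₃ :: r, htlen, hmem, htabsome, hcase, heq, _ =>
            have htk : (c :: b :: c₃ :: r).take 3 = [c, b, c₃] := by simp
            rw [htk] at hmem htabsome heq
            have s1 : ¬ (k0 :: ks) <+: (c :: b :: c₃ :: r) := by
              intro hpre
              exact heq (by rw [← htk, (List.prefix_iff_eq_take.mp hpre : _), hklen])
            have s2 : ¬ (k0 :: ks) <+: (b :: c₃ :: r) := by
              intro hpre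
              rcases prefix_append_cases (by simpa using hpre : (k0 :: ks) <+: [b, c₃] ++ r) with h1 | h2
              · have := List.IsPrefix.length_le h1; simp [hk] at this
              · exact (hC2 _ hmem).1 (by simpa using h2)
            have s3 : ¬ (k0 :: ks) <+: (c₃ :: r) := by
              intro hpre
              rcases prefix_append_cases (by simpa using hpre : (k0 :: ks) <+: [c₃] ++ r) with h1 | h2
              · have := List.IsPrefix.length_le h1; simp [hk] at this
              · exact (hC2 _ hmem).2 (by simpa using h2)
            rw [scanT_some hcase, myRep_neg s1, myRep_neg s2, myRep_neg s3]
            have htabsome2 : List.lookup ((c :: (b :: c₃ :: myRep k0 ks v r)).take 3) tab = some v₀ := by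
              have : (c :: b :: c₃ :: myRep k0 ks v r).take 3 = [c, b, c₃] := by simp
              rw [this]
              exact htabsome
            rw [scanT_some htabsome2]
            simp only [List.drop_succ_cons, List.drop_zero]
            have hrl : r.length ≤ n := by simp at htlen; omega
            rw [ih r hrl]

theorem scanT_nil : ∀ l : List Char, scanT [] l = l := by
  intro l
  induction l with
  | nil => rw [scanT]
  | cons c t ih => rw [scanT_none (by rfl), ih]

theorem replace_eq_myRep (l v : List Char) (k0 : Char) (ks : List Char) :
    PySem.Chars.replace l (k0 :: ks) v = myRep k0 ks v l := by
  rw [PySem.Chars.replace]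
  simp only [List.isEmpty_cons, Bool.false_eq_true, if_false]
  simpa using go_eq k0 ks v l.length l [] le_rfl

theorem scan_eq_chain (l : List Char) : scanT revTab l =
    myRep 'M' ['_', 'V'] ['A', 'R', 'G', '9'] (myRep 'M' ['_', 'L'] ['A', 'R', 'G', '8'] (myRep 'M' ['_', 'H'] ['A', 'R', 'G', '7'] (myRep 'M' ['_', 'C'] ['A', 'R', 'G', '6'] (myRep 'M' ['_', 'O'] ['A', 'R', 'G', '5'] (myRep 'D' ['_', 'V'] ['A', 'R', 'G', '4'] (myRep 'D' ['_', 'L'] ['A', 'R', 'G', '3'] (myRep 'D' ['_', 'H'] ['A', 'R', 'G', '2'] (myRep 'D' ['_', 'C'] ['A', 'R', 'G', '1'] (myRep 'D' ['_', 'O'] ['A', 'R', 'G', '0'] (l)))))))))) := by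
  have s0 : ∀ m : List Char, scanT ([(['D', '_', 'O'], ['A', 'R', 'G', '0']), (['D', '_', 'C'], ['A', 'R', 'G', '1']), (['D', '_', 'H'], ['A', 'R', 'G', '2']), (['D', '_', 'L'], ['A', 'R', 'G', '3']), (['D', '_', 'V'], ['A', 'R', 'G', '4']), (['M', '_', 'O'], ['A', 'R', 'G', '5']), (['M', '_', 'C'], ['A', 'R', 'G', '6']), (['M', '_', 'H'], ['A', 'R', 'G', '7']), (['M', '_', 'L'], ['A', 'R', 'G', '8']), (['M', '_', 'V'], ['A', 'R', 'G', '9'])]) m = scanT ([(['D', '_', 'C'], ['A', 'R', 'G', '1']), (['D', '_', 'H'], ['A', 'R', 'G', '2']), (['D', '_', 'L'], ['A', 'R', 'G', '3']), (['D', '_', 'V'], ['A', 'R', 'G', '4']), (['M', '_', 'O'], ['A', 'R', 'G', '5']), (['M', '_', 'C'], ['A', 'R', 'G', '6']), (['M', '_', 'H'], ['A', 'R', 'G', '7']), (['M', '_', 'L'], ['A', 'R', 'G', '8']), (['M', '_', 'V'], ['A', 'R', 'G', '9'])]) (myRep 'D' ['_', 'O'] ['A', 'R', 'G', '0'] m)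 :=
    fun m => step 'D' ['_', 'O'] ['A', 'R', 'G', '0'] _ (by decide) (by decide) (by decide) (by decide) (by decide) (by decide) m.length m le_rfl
  have s1 : ∀ m : List Char, scanT ([(['D', '_', 'C'], ['A', 'R', 'G', '1']), (['D', '_', 'H'], ['A', 'R', 'G', '2']), (['D', '_', 'L'], ['A', 'R', 'G', '3']), (['D', '_', 'V'], ['A', 'R', 'G', '4']), (['M', '_', 'O'], ['A', 'R', 'G', '5']), (['M', '_', 'C'], ['A', 'R', 'G', '6']), (['M', '_', 'H'], ['A', 'R', 'G', '7']), (['M', '_', 'L'], ['A', 'R', 'G', '8']), (['M', '_', 'V'], ['A', 'R', 'G', '9'])]) m = scanT ([(['D', '_', 'H'], ['A', 'R', 'G', '2']), (['D', '_', 'L'], ['A', 'R', 'G', '3']), (['D', '_', 'V'], ['A', 'R', 'G', '4']), (['M', '_', 'O'], ['A', 'R', 'G', '5']), (['M', '_', 'C'], ['A', 'R', 'G', '6']), (['M', '_', 'H'], ['A', 'R', 'G', '7']), (['M', '_', 'L'], ['A', 'R', 'G', '8']), (['M', '_', 'V'], ['A', 'R', 'G', '9'])]) (myRep 'D' ['_',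 'C'] ['A', 'R', 'G', '1'] m) :=
    fun m => step 'D' ['_', 'C'] ['A', 'R', 'G', '1'] _ (by decide) (by decide) (by decide) (by decide) (by decide) (by decide) m.length m le_rfl
  have s2 : ∀ m : List Char, scanT ([(['D', '_', 'H'], ['A', 'R', 'G', '2']), (['D', '_', 'L'], ['A', 'R', 'G', '3']), (['D', '_', 'V'], ['A', 'R', 'G', '4']), (['M', '_', 'O'], ['A', 'R', 'G', '5']), (['M', '_', 'C'], ['A', 'R', 'G', '6']), (['M', '_', 'H'], ['A', 'R', 'G', '7']), (['M', '_', 'L'], ['A', 'R', 'G', '8']), (['M', '_', 'V'], ['A', 'R', 'G', '9'])]) m = scanT ([(['D', '_', 'L'], ['A', 'R', 'G', '3']), (['D', '_', 'V'], ['A', 'R', 'G', '4']), (['M', '_', 'O'], ['A', 'R', 'G', '5']), (['M', '_', 'C'], ['A', 'R', 'G', '6']), (['M', '_', 'H'], ['A', 'R', 'G', '7']), (['M', '_', 'L'], ['A', 'R', 'G', '8']), (['M', '_', 'V'], ['A', 'R', 'G', '9'])]) (myRep 'D' ['_', 'H'] ['A', 'R', 'G', '2'] m) :=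
    fun m => step 'D' ['_', 'H'] ['A', 'R', 'G', '2'] _ (by decide) (by decide) (by decide) (by decide) (by decide) (by decide) m.length m le_rfl
  have s3 : ∀ m : List Char, scanT ([(['D', '_', 'L'], ['A', 'R', 'G', '3']), (['D', '_', 'V'], ['A', 'R', 'G', '4']), (['M', '_', 'O'], ['A', 'R', 'G', '5']), (['M', '_', 'C'], ['A', 'R', 'G', '6']), (['M', '_', 'H'], ['A', 'R', 'G', '7']), (['M', '_', 'L'], ['A', 'R', 'G', '8']), (['M', '_', 'V'], ['A', 'R', 'G', '9'])]) m = scanT ([(['D', '_', 'V'], ['A', 'R', 'G', '4']), (['M', '_', 'O'], ['A', 'R', 'G', '5']), (['M', '_', 'C'], ['A', 'R', 'G', '6']), (['M', '_', 'H'], ['A', 'R', 'G', '7']), (['M', '_', 'L'], ['A', 'R', 'G', '8']), (['M', '_', 'V'], ['A', 'R', 'G', '9'])]) (myRep 'D' ['_', 'L'] ['A', 'R', 'G', '3'] m) :=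
    fun m => step 'D' ['_', 'L'] ['A', 'R', 'G', '3'] _ (by decide) (by decide) (by decide) (by decide) (by decide) (by decide) m.length m le_rfl
  have s4 : ∀ m : List Char, scanT ([(['D', '_', 'V'], ['A', 'R', 'G', '4']), (['M', '_', 'O'], ['A', 'R', 'G', '5']), (['M', '_', 'C'], ['A', 'R', 'G', '6']), (['M', '_', 'H'], ['A', 'R', 'G', '7']), (['M', '_', 'L'], ['A', 'R', 'G', '8']), (['M', '_', 'V'], ['A', 'R', 'G', '9'])]) m = scanT ([(['M', '_', 'O'], ['A', 'R', 'G', '5']), (['M', '_', 'C'], ['A', 'R', 'G', '6']), (['M', '_', 'H'], ['A', 'R', 'G', '7']), (['M', '_', 'L'], ['A', 'R', 'G', '8']), (['M', '_', 'V'], ['A', 'R', 'G', '9'])]) (myRep 'D' ['_', 'V'] ['A', 'R', 'G', '4'] m) :=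
    fun m => step 'D' ['_', 'V'] ['A', 'R', 'G', '4'] _ (by decide) (by decide) (by decide) (by decide) (by decide) (by decide) m.length m le_rfl
  have s5 : ∀ m : List Char, scanT ([(['M', '_', 'O'], ['A', 'R', 'G', '5']), (['M', '_', 'C'], ['A', 'R', 'G', '6']), (['M', '_', 'H'], ['A', 'R', 'G', '7']), (['M', '_', 'L'], ['A', 'R', 'G', '8']), (['M', '_', 'V'], ['A', 'R', 'G', '9'])]) m = scanT ([(['M', '_', 'C'], ['A', 'R', 'G', '6']), (['M', '_', 'H'], ['A', 'R', 'G', '7']), (['M', '_', 'L'], ['A', 'R', 'G', '8']), (['M', '_', 'V'], ['A', 'R', 'G', '9'])]) (myRep 'M' ['_', 'O'] ['A', 'R', 'G', '5'] m) :=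
    fun m => step 'M' ['_', 'O'] ['A', 'R', 'G', '5'] _ (by decide) (by decide) (by decide) (by decide) (by decide) (by decide) m.length m le_rfl
  have s6 : ∀ m : List Char, scanT ([(['M', '_', 'C'], ['A', 'R', 'G', '6']), (['M', '_', 'H'], ['A', 'R', 'G', '7']), (['M', '_', 'L'], ['A', 'R', 'G', '8']), (['M', '_', 'V'], ['A', 'R', 'G', '9'])]) m = scanT ([(['M', '_', 'H'], ['A', 'R', 'G', '7']), (['M', '_', 'L'], ['A', 'R', 'G', '8']), (['M', '_', 'V'], ['A', 'R', 'G', '9'])]) (myRep 'M' ['_', 'C'] ['A', 'R', 'G', '6'] m) :=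
    fun m => step 'M' ['_', 'C'] ['A', 'R', 'G', '6'] _ (by decide) (by decide) (by decide) (by decide) (by decide) (by decide) m.length m le_rfl
  have s7 : ∀ m : List Char, scanT ([(['M', '_', 'H'], ['A', 'R', 'G', '7']), (['M', '_', 'L'], ['A', 'R', 'G', '8']), (['M', '_', 'V'], ['A', 'R', 'G', '9'])]) m = scanT ([(['M', '_', 'L'], ['A', 'R', 'G', '8']), (['M', '_', 'V'], ['A', 'R', 'G', '9'])]) (myRep 'M' ['_', 'H'] ['A', 'R', 'G', '7'] m) :=
    fun m => step 'M' ['_', 'H'] ['A', 'R', 'G', '7'] _ (by decide) (by decide) (by decide) (by decide) (by decide) (by decide) m.length m le_rfl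
  have s8 : ∀ m : List Char, scanT ([(['M', '_', 'L'], ['A', 'R', 'G', '8']), (['M', '_', 'V'], ['A', 'R', 'G', '9'])]) m = scanT ([(['M', '_', 'V'], ['A', 'R', 'G', '9'])]) (myRep 'M' ['_', 'L'] ['A', 'R', 'G', '8'] m) :=
    fun m => step 'M' ['_', 'L'] ['A', 'R', 'G', '8'] _ (by decide) (by decide) (by decide) (by decide) (by decide) (by decide) m.length m le_rfl
  have s9 : ∀ m : List Char, scanT ([(['M', '_', 'V'], ['A', 'R', 'G', '9'])]) m = scanT ([]) (myRep 'M' ['_', 'V'] ['A', 'R', 'G', '9'] m) :=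
    fun m => step 'M' ['_', 'V'] ['A', 'R', 'G', '9'] _ (by decide) (by decide) (by decide) (by decide) (by decide) (by decide) m.length m le_rfl
  show scanT ([(['D', '_', 'O'], ['A', 'R', 'G', '0']), (['D', '_', 'C'], ['A', 'R', 'G', '1']), (['D', '_', 'H'], ['A', 'R', 'G', '2']), (['D', '_', 'L'], ['A', 'R', 'G', '3']), (['D', '_', 'V'], ['A', 'R', 'G', '4']), (['M', '_', 'O'], ['A', 'R', 'G', '5']), (['M', '_', 'C'], ['A', 'R', 'G', '6']), (['M', '_', 'H'], ['A', 'R', 'G', '7']), (['M', '_', 'L'], ['A', 'R', 'G', '8']), (['M', '_', 'V'], ['A', 'R', 'G', '9'])]) l = _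
  rw [s0, s1, s2, s3, s4, s5, s6, s7, s8, s9, scanT_nil]

theorem argnorm_eq_chain (seed_str : String) : argnorm seed_str = String.ofList
    (myRep 'M' ['_', 'V'] ['A', 'R', 'G', '9'] (myRep 'M' ['_', 'L'] ['A', 'R', 'G', '8'] (myRep 'M' ['_', 'H'] ['A', 'R', 'G', '7'] (myRep 'M' ['_', 'C'] ['A', 'R', 'G', '6'] (myRep 'M' ['_', 'O'] ['A', 'R', 'G', '5'] (myRep 'D' ['_', 'V'] ['A', 'R', 'G', '4'] (myRep 'D' ['_', 'L'] ['A', 'R', 'G', '3'] (myRep 'D' ['_', 'H'] ['A', 'R', 'G', '2'] (myRep 'D' ['_', 'C'] ['A', 'R', 'G', '1'] (myRep 'D' ['_', 'O'] ['A', 'R', 'G', '0'] (seed_str.toList))))))))))) := by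
  simp only [argnorm, List.foldl_cons, List.foldl_nil, PySem.Str.replace, String.toList_ofList,
    show ("D_O" : String).toList = ['D', '_', 'O'] from rfl, show ("D_C" : String).toList = ['D', '_', 'C'] from rfl, show ("D_H" : String).toList = ['D', '_', 'H'] from rfl, show ("D_L" : String).toList = ['D', '_', 'L'] from rfl, show ("D_V" : String).toList = ['D', '_', 'V'] from rfl, show ("M_O" : String).toList = ['M', '_', 'O'] from rfl, show ("M_C" : String).toList = ['M', '_', 'C'] from rfl, show ("M_H" : String).toList = ['M', '_', 'H'] from rfl, show ("M_L" : String).toList = ['M', '_', 'L'] from rfl, show ("M_V" : String).toList = ['M', '_', 'V'] from rfl, show ("ARG0" : String).toList = ['A', 'R', 'G', '0'] from rfl, show ("ARG1" : String).toList = ['A', 'R', 'G', '1'] from rfl, show ("ARG2" : String).toList = ['A', 'R', 'G', '2'] from rfl, show ("ARG3" : String).toList = ['A', 'R', 'G', '3'] from rfl, show ("ARG4" : String).toList = ['A', 'R', 'G', '4'] from rfl, show ("ARG5" : String).toList = ['A', 'R', 'G', '5'] from rfl, show ("ARG6" : String).toList = ['A', 'R', 'G', '6'] from rfl, show ("ARG7"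 : String).toList = ['A', 'R', 'G', '7'] from rfl, show ("ARG8" : String).toList = ['A', 'R', 'G', '8'] from rfl, show ("ARG9" : String).toList = ['A', 'R', 'G', '9'] from rfl, replace_eq_myRep]

-- ===== VERDICT (by name: the statement is the Claim_ definition above) =====
theorem argnorm_spec : Claim_equal_argnorm := by
  intro seed_str _
  unfold Spec_argnorm argnorm_alt
  rw [argnorm_eq_chain, scan_eq_chain]
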